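-- pv_equiv track=rewrite | github.com/3493620082/OakBar | src/game.py | f_isLastDayOfMonth
-- ===== SOURCE A (Python) =====
-- def f_isLastDayOfMonth(day: int) -> bool:
--         """
--         [豆包AI生成]
--         判断给定天数是否为当月最后一天（按平年规则，不考虑闰年）
--         规则：一三五七八十腊（1、3、5、7、8、10、12月）31天，
--               四六九冬（4、6、9、11月）30天，2月28天
--         支持天数大于365天（自动循环计算对应年份的天数）
--         :param day: 天数
--         :return: True或False
--         """
--         # 平年各月天数（索引0占位，对应1-12月）
--         month_days = [0, 31, 28, 31, 30, 31, 30, 31, 31, 30, 31, 30, 31]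
--         # 处理天数大于365的情况（循环计算）
--         total_days_in_year = 365
--         normalized_day = (day - 1) % total_days_in_year + 1  # 确保结果在1-365之间
--         # 计算当前天数对应的月份
--         current_sum = 0
--         target_month = 0
--         for month in range(1, 13):
--             current_sum += month_days[month]
--             if normalized_day <= current_sum:
--                 target_month = month
--                 break
--         # 判断是否为当前月份的最后一天
--         last_day_of_month = month_days[target_month]
--         # 计算当前月份的第一天（总天数累加值 - 当月天数 + 1）
--         first_day_of_month = current_sum - last_day_of_month + 1
--         # 计算当前天数在当月的日期
--         day_in_month = normalized_day - first_day_of_month + 1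
--         return day_in_month == last_day_of_month
-- ===== SOURCE B (Python) =====
-- MONTH_ENDS = {31, 59, 90, 120, 151, 181, 212, 243, 273, 304, 334, 365}
--
-- def f_isLastDayOfMonth(day: int) -> bool:
--     normalized_day = (day - 1) % 365 + 1
--     return normalized_day in MONTH_ENDS
-- ===== Notes on version B (the rewrite author's own statement) =====
-- stated objective: simpler
-- what changed: Replaced the month-by-month accumulation loop with break and the first-day/day-in-month reconstruction by a single membership test of the normalized day in the precomputed set of cumulative month-end day numbers.
import Mathlib
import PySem

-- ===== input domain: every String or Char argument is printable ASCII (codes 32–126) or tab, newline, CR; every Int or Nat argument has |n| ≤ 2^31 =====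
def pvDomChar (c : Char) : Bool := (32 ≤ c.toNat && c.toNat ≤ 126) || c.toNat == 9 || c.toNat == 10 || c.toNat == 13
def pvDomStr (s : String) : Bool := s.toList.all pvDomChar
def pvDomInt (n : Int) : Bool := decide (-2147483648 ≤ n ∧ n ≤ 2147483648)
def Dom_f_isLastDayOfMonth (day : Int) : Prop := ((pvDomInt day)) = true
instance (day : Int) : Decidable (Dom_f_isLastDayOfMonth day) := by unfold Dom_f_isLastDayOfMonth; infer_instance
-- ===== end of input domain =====

-- B replaces A's month-accumulation loop and first-day reconstruction by a single
-- membership test of the normalized day in the precomputed cumulative month-end set (simpler).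


-- ===== PORT A =====
-- the 'for month in range(1,13): … if …: target_month = month; break' loop of A
-- (month_days[month] is always in range here, so the .getD default never fires)
def pvALoop (month_days : List Int) (normalized : Int) : List Int → Int → Int × Int
  | [], current_sum => (current_sum, 0)
  | m :: rest, current_sum =>
      let cs := current_sum + ((PySem.List.pyGet? month_days m).getD 0)
      if normalized ≤ cs then (cs, m) else pvALoop month_days normalized rest cs

-- the body of A after computing normalized_day (A's code, step for step)
def pvACore (normalized : Int) : Bool :=
  let month_days : List Int := [0, 31, 28, 31, 30, 31, 30, 31, 31, 30, 31, 30, 31]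
  let r := pvALoop month_days normalized (PySem.List.pyRange 1 13 1) 0
  let current_sum := r.1
  let target_month := r.2
  let last_day_of_month := (PySem.List.pyGet? month_days target_month).getD 0
  let first_day_of_month := current_sum - last_day_of_month + 1
  let day_in_month := normalized - first_day_of_month + 1
  day_in_month == last_day_of_month

def f_isLastDayOfMonth (day : Int) : Bool :=
  pvACore (PySem.Int.mod (day - 1) 365 + 1)

-- ===== PORT B =====
def pvMonthEnds : List Int := [31, 59, 90, 120, 151, 181, 212, 243, 273, 304, 334, 365]

def f_isLastDayOfMonth_alt (day : Int) : Bool :=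
  let normalized_day := PySem.Int.mod (day - 1) 365 + 1
  pvMonthEnds.contains normalized_day

-- ===== PRECONDITION & SPEC =====
def Spec_f_isLastDayOfMonth (day : Int) (out : Bool) : Prop := out = f_isLastDayOfMonth_alt day
instance (day : Int) (out : Bool) : Decidable (Spec_f_isLastDayOfMonth day out) := by unfold Spec_f_isLastDayOfMonth; infer_instance

-- ===== CLAIM (what is proved, stated in full; the proofs are below) =====
def Claim_equal_f_isLastDayOfMonth : Prop := ∀ (day : Int), Dom_f_isLastDayOfMonth day → Spec_f_isLastDayOfMonth day (f_isLastDayOfMonth day)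

-- ===== LEMMAS AND PROOFS =====

-- both ports agree on every possible normalized day 1..365 (checked by the kernel)
set_option maxRecDepth 100000 in
theorem pvCoreAgrees : ∀ k : Fin 365, pvACore ((k : Int) + 1) = pvMonthEnds.contains ((k : Int) + 1) := by
  decide

-- ===== VERDICT (by name: the statement is the Claim_ definition above) =====
theorem f_isLastDayOfMonth_spec : Claim_equal_f_isLastDayOfMonth := by
  intro day _
  unfold Spec_f_isLastDayOfMonth f_isLastDayOfMonth f_isLastDayOfMonth_alt
  set n : Int := PySem.Int.mod (day - 1) 365 with hn
  have h365 : (0:Int) < 365 := by norm_num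
  have hge : 0 ≤ n := by
    rw [hn, PySem.Int.mod_eq_emod_of_pos h365]; exact Int.emod_nonneg _ (by norm_num)
  have hlt : n < 365 := by
    rw [hn, PySem.Int.mod_eq_emod_of_pos h365]; exact Int.emod_lt_of_pos _ h365
  have hk : n.toNat < 365 := by omega
  have hcast : ((⟨n.toNat, hk⟩ : Fin 365) : Int) = n := by simp; omega
  have := pvCoreAgrees ⟨n.toNat, hk⟩
  rw [hcast] at this
  simpa using this
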